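-- pv_equiv track=rewrite | github.com/Computational-TDMS/TDEaseNext | app/services/node_data_service.py | _find_tabular_header
-- ===== SOURCE A (Python) =====
-- from typing import Any, Dict, List, Optional
--
-- def _looks_like_key_value_preamble(fields: List[str]) -> bool:
--     """
--     Detect if a TSV row looks like a key-value preamble line (e.g. "Key: value").
--     Used to skip non-header lines when detecting tabular header. Port-level
--     fileFormat.preambleStyle (key_value | comment | none) can override behavior in future.
--     """
--     non_empty = [field.strip() for field in fields if field.strip()]
--     if not non_empty:
--         return True
--     if non_empty[0].endswith(":"):
--         return True
--     if len(non_empty) <= 2 and any(field.endswith(":") for field in non_empty):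
--         return True
--     return False
--
-- def _find_tabular_header(
--     lines: List[str],
--     delimiter: str,
--     preamble_style: str = "key_value",
-- ) -> tuple[Optional[int], List[str]]:
--     """
--     Detect header row and return (line_index, columns).
--
--     TSV: skips comment lines (#, *) and key-value preamble when preamble_style is "key_value".
--     CSV: uses first non-empty line as header. preamble_style can be "key_value" | "comment" | "none".
--     """
--     skip_preamble = preamble_style == "key_value"
--
--     for idx, raw in enumerate(lines):
--         stripped = raw.strip()
--         if not stripped:
--             continue
--
--         if delimiter == ",":
--             return idx, [part.strip() for part in stripped.split(delimiter)]
--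
--         if stripped.startswith("#") or stripped.startswith("*"):
--             continue
--         if "\t" not in stripped:
--             continue
--
--         columns = [part.strip() for part in stripped.split("\t")]
--         non_empty = [part for part in columns if part]
--         if len(non_empty) < 2:
--             continue
--         if skip_preamble and _looks_like_key_value_preamble(columns):
--             continue
--
--         has_nonempty_after = False
--         has_data_like_after = False
--         for follow_raw in lines[idx + 1 :]:
--             follow = follow_raw.strip()
--             if not follow:
--                 continue
--             has_nonempty_after = True
--             if follow.startswith("#") or follow.startswith("*"):
--                 continue
--             if "\t" not in follow:
--                 continue
--             follow_fields = [part.strip() for part in follow.split("\t")]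
--             follow_non_empty = [part for part in follow_fields if part]
--             if len(follow_non_empty) < 2:
--                 continue
--             if skip_preamble and _looks_like_key_value_preamble(follow_fields):
--                 continue
--             has_data_like_after = True
--             break
--
--         if has_data_like_after or not has_nonempty_after:
--             return idx, columns
--
--     return None, []
-- ===== SOURCE B (Python) =====
-- from typing import List, Optional
--
--
-- def _is_candidate(stripped: str, skip_preamble: bool) -> bool:
--     """True iff a stripped line looks like a tabular (header/data) row."""
--     if not stripped or stripped.startswith("#") or stripped.startswith("*"):
--         return False
--     if "\t" not in stripped:
--         return False
--     fields = [part.strip() for part in stripped.split("\t")]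
--     if len([part for part in fields if part]) < 2:
--         return False
--     if skip_preamble:
--         ne = [f.strip() for f in fields if f.strip()]
--         if not ne or ne[0].endswith(":") or (
--             len(ne) <= 2 and any(f.endswith(":") for f in ne)
--         ):
--             return False
--     return True
--
--
-- def _find_tabular_header(
--     lines: List[str],
--     delimiter: str,
--     preamble_style: str = "key_value",
-- ) -> tuple[Optional[int], List[str]]:
--     if delimiter == ",":
--         for idx, raw in enumerate(lines):
--             stripped = raw.strip()
--             if stripped:
--                 return idx, [part.strip() for part in stripped.split(delimiter)]
--         return None, []
--
--     skip_preamble = preamble_style == "key_value"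
--     found = None
--     for idx, raw in enumerate(lines):
--         if _is_candidate(raw.strip(), skip_preamble):
--             found = (idx, raw, lines[idx + 1:])
--             break
--     if found is None:
--         return None, []
--     idx, raw, rest = found
--     columns = [part.strip() for part in raw.strip().split("\t")]
--     if any(_is_candidate(l.strip(), skip_preamble) for l in rest):
--         return idx, columns
--     if any(l.strip() for l in rest):
--         return None, []
--     return idx, columns
-- ===== Notes on version B (the rewrite author's own statement) =====
-- stated objective: simpler
-- what changed: A interleaves candidate detection with a per-candidate break-flag inner rescan of the tail; B splits the task: handle the CSV delimiter by a plain first-non-empty scan, otherwise find the FIRST candidate row with one predicate and decide directly from two any() scans of its tail (another candidate after, or no non-empty line after), since a lone candidate followed only by blank/non-candidate text can never be confirmed later.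
import Mathlib
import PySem

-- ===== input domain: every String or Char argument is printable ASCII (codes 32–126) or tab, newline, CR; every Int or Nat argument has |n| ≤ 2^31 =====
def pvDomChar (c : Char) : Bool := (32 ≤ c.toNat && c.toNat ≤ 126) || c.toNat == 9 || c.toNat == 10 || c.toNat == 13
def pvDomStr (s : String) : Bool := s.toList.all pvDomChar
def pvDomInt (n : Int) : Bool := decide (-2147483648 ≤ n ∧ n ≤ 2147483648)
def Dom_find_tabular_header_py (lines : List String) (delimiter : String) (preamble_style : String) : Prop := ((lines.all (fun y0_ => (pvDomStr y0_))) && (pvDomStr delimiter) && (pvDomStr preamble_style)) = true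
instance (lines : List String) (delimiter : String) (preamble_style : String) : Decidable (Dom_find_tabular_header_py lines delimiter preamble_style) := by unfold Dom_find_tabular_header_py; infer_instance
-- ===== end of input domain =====

-- B replaces A's per-candidate break-flag rescan of the tail by one first-candidate
-- search plus two any() scans of its tail (objective: simpler decomposition).


-- s.split(sep) for a non-empty sep (both Pythons only split on "\t" and ","),
-- rendered exactly by PySem.Chars.splitOn; shared by both ports
def pySplit (s sep : String) : List String :=
  (PySem.Chars.splitOn s.toList sep.toList).map (fun cs => String.ofList cs)

-- ===== PORT A =====

-- _looks_like_key_value_preamble(fields)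
def looks_like_kv (fields : List String) : Bool :=
  let non_empty := (fields.filter (fun f => PySem.Str.strip f ≠ "")).map (fun f => PySem.Str.strip f)
  match non_empty with
  | [] => true
  | f0 :: _ =>
    if PySem.Str.endswith f0 ":" then true
    else if decide (non_empty.length ≤ 2) && non_empty.any (fun f => PySem.Str.endswith f ":") then true
    else false

-- the inner 'for follow_raw in lines[idx + 1:]' loop of A: state = has_nonempty_after,
-- result = (has_nonempty_after, has_data_like_after); 'break' = returning (true, true)
def innerScanA (skip : Bool) : List String → Bool → Bool × Bool
  | [], ne => (ne, false)
  | f :: rest, ne =>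
    let follow := PySem.Str.strip f
    if follow == "" then innerScanA skip rest ne
    else if PySem.Str.startswith follow "#" || PySem.Str.startswith follow "*" then innerScanA skip rest true
    else if !(PySem.Str.isIn "\t" follow) then innerScanA skip rest true
    else
      let follow_fields := (pySplit follow "\t").map (fun p => PySem.Str.strip p)
      if (follow_fields.filter (fun p => p ≠ "")).length < 2 then innerScanA skip rest true
      else if skip && looks_like_kv follow_fields then innerScanA skip rest true
      else (true, true)

-- the outer 'for idx, raw in enumerate(lines)' loop of A; the structural tail 'rest'
-- is exactly lines[idx + 1:]
def loopA (delimiter : String) (skip : Bool) : List String → Int → Option Int × List String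
  | [], _ => (none, [])
  | raw :: rest, idx =>
    let stripped := PySem.Str.strip raw
    if stripped == "" then loopA delimiter skip rest (idx + 1)
    else if delimiter == "," then
      (some idx, (pySplit stripped delimiter).map (fun p => PySem.Str.strip p))
    else if PySem.Str.startswith stripped "#" || PySem.Str.startswith stripped "*" then loopA delimiter skip rest (idx + 1)
    else if !(PySem.Str.isIn "\t" stripped) then loopA delimiter skip rest (idx + 1)
    else
      let columns := (pySplit stripped "\t").map (fun p => PySem.Str.strip p)
      if (columns.filter (fun p => p ≠ "")).length < 2 then loopA delimiter skip rest (idx + 1)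
      else if skip && looks_like_kv columns then loopA delimiter skip rest (idx + 1)
      else
        let scan := innerScanA skip rest false
        if scan.2 || !scan.1 then (some idx, columns) else loopA delimiter skip rest (idx + 1)

def find_tabular_header_py (lines : List String) (delimiter : String) (preamble_style : String) : Option Int × List String :=
  let skip := preamble_style == "key_value"
  loopA delimiter skip lines 0

-- ===== PORT B =====

-- _is_candidate(stripped, skip_preamble); ne[0] is rendered totally as headD "" —
-- the 'or'-short-circuit of the Python guards it with 'not ne'
def is_candidate (stripped : String) (skip : Bool) : Bool :=
  if stripped == "" || PySem.Str.startswith stripped "#" || PySem.Str.startswith stripped "*" then false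
  else if !(PySem.Str.isIn "\t" stripped) then false
  else
    let fields := (pySplit stripped "\t").map (fun p => PySem.Str.strip p)
    if (fields.filter (fun p => p ≠ "")).length < 2 then false
    else if skip then
      let ne := (fields.filter (fun f => PySem.Str.strip f ≠ "")).map (fun f => PySem.Str.strip f)
      if ne.isEmpty || PySem.Str.endswith (ne.headD "") ":" ||
          (decide (ne.length ≤ 2) && ne.any (fun f => PySem.Str.endswith f ":")) then false
      else true
    else true

-- B's CSV branch: first line with non-empty strip()
def csvLoopB (delimiter : String) : List String → Int → Option Int × List String
  | [], _ => (none, [])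
  | raw :: rest, idx =>
    let stripped := PySem.Str.strip raw
    if stripped == "" then csvLoopB delimiter rest (idx + 1)
    else (some idx, (pySplit stripped delimiter).map (fun p => PySem.Str.strip p))

-- B's first-candidate search; the returned structural tail is lines[idx + 1:]
def findFirstCandB (skip : Bool) : List String → Int → Option (Int × String × List String)
  | [], _ => none
  | raw :: rest, idx =>
    if is_candidate (PySem.Str.strip raw) skip then some (idx, raw, rest)
    else findFirstCandB skip rest (idx + 1)

def find_tabular_header_py_alt (lines : List String) (delimiter : String) (preamble_style : String) : Option Int × List String :=
  if delimiter == "," then csvLoopB delimiter lines 0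
  else
    let skip := preamble_style == "key_value"
    match findFirstCandB skip lines 0 with
    | none => (none, [])
    | some (idx, raw, rest) =>
      let columns := (pySplit (PySem.Str.strip raw) "\t").map (fun p => PySem.Str.strip p)
      if rest.any (fun l => is_candidate (PySem.Str.strip l) skip) then (some idx, columns)
      else if rest.any (fun l => !(PySem.Str.strip l == "")) then (none, [])
      else (some idx, columns)

-- ===== PRECONDITION & SPEC =====
def Spec_find_tabular_header_py (lines : List String) (delimiter : String) (preamble_style : String) (out : Option Int × List String) : Prop := out = find_tabular_header_py_alt lines delimiter preamble_style
instance (lines : List String) (delimiter : String) (preamble_style : String) (out : Option Int × List String) : Decidable (Spec_find_tabular_header_py lines delimiter preamble_style out) := by unfold Spec_find_tabular_header_py; infer_instance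

-- ===== CLAIM (what is proved, stated in full; the proofs are below) =====
def Claim_equal_find_tabular_header_py : Prop := ∀ (lines : List String) (delimiter : String) (preamble_style : String), Dom_find_tabular_header_py lines delimiter preamble_style → Spec_find_tabular_header_py lines delimiter preamble_style (find_tabular_header_py lines delimiter preamble_style)

-- ===== LEMMAS AND PROOFS =====

-- B's inlined preamble test equals A's helper
theorem kv_inline_eq (fields : List String) :
    (((fields.filter (fun f => PySem.Str.strip f ≠ "")).map (fun f => PySem.Str.strip f)).isEmpty ||
     PySem.Str.endswith (((fields.filter (fun f => PySem.Str.strip f ≠ "")).map (fun f => PySem.Str.strip f)).headD "") ":" ||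
     (decide ((((fields.filter (fun f => PySem.Str.strip f ≠ "")).map (fun f => PySem.Str.strip f))).length ≤ 2) &&
      ((fields.filter (fun f => PySem.Str.strip f ≠ "")).map (fun f => PySem.Str.strip f)).any (fun f => PySem.Str.endswith f ":"))) =
    looks_like_kv fields := by
  unfold looks_like_kv
  cases h : (fields.filter (fun f => PySem.Str.strip f ≠ "")).map (fun f => PySem.Str.strip f) with
  | nil => simp
  | cons f0 tl =>
    simp only [List.isEmpty_cons, List.headD_cons, Bool.false_or]
    by_cases h1 : PySem.Str.endswith f0 ":" = true
    · simp [List.any_eq]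
    · simp only [Bool.not_eq_true] at h1
      simp [List.any_eq]

-- the four ways a line fails B's candidate test, and the one way it passes
theorem cand_false_of_empty (s : String) (skip : Bool) (h0 : (s == "") = true) :
    is_candidate s skip = false := by
  simp only [is_candidate, h0, Bool.true_or]
  rw [if_pos trivial]

theorem cand_false_of_comment (s : String) (skip : Bool)
    (h1 : (PySem.Str.startswith s "#" || PySem.Str.startswith s "*") = true) :
    is_candidate s skip = false := by
  simp only [is_candidate, Bool.or_assoc, h1, Bool.or_true]
  rw [if_pos trivial]

theorem cand_false_of_notab (s : String) (skip : Bool)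
    (h2 : PySem.Str.isIn "\t" s = false) :
    is_candidate s skip = false := by
  simp only [is_candidate, h2, Bool.not_false]
  rw [if_pos trivial, ite_self]

theorem cand_false_of_few (s : String) (skip : Bool)
    (h3 : (((pySplit s "\t").map (fun p => PySem.Str.strip p)).filter
      (fun p => p ≠ "")).length < 2) :
    is_candidate s skip = false := by
  simp only [is_candidate, if_pos h3, ite_self]

theorem cand_false_of_kv (s : String) (skip : Bool) (hs : skip = true)
    (hkv : looks_like_kv ((pySplit s "\t").map (fun p => PySem.Str.strip p)) = true) :
    is_candidate s skip = false := by
  simp only [is_candidate, hs, kv_inline_eq, hkv, if_true, ite_self]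

theorem cand_true (s : String) (skip : Bool)
    (h0 : (s == "") = false)
    (h1 : (PySem.Str.startswith s "#" || PySem.Str.startswith s "*") = false)
    (h2 : PySem.Str.isIn "\t" s = true)
    (h3 : ¬ (((pySplit s "\t").map (fun p => PySem.Str.strip p)).filter
      (fun p => p ≠ "")).length < 2)
    (hkv : skip = true → looks_like_kv ((pySplit s "\t").map (fun p => PySem.Str.strip p)) = false) :
    is_candidate s skip = true := by
  rcases Bool.or_eq_false_iff.mp h1 with ⟨hA, hB⟩
  simp only [is_candidate, h0, hA, hB, Bool.or_false, Bool.false_eq_true, if_false, h2,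
    Bool.not_true]
  rw [if_neg h3]
  by_cases hs : skip = true
  · rw [if_pos hs, kv_inline_eq, hkv hs]
    rw [if_neg (by simp)]
  · rw [if_neg hs]

-- in the CSV case A's loop is B's first-non-empty scan
theorem loopA_csv (skip : Bool) (lines : List String) (idx : Int) :
    loopA "," skip lines idx = csvLoopB "," lines idx := by
  induction lines generalizing idx with
  | nil => rfl
  | cons raw rest ih =>
    simp only [loopA, csvLoopB]
    by_cases h : (PySem.Str.strip raw == "") = true
    · simp only [h, if_true, ih]
    · simp only [h]
      rw [if_pos (show (("," : String) == ",") = true from rfl)]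
      simp only [Bool.false_eq_true, if_false]

-- one step of A's outer loop (non-CSV): candidate test factored out
theorem loopA_cons_eq (delimiter : String) (skip : Bool) (raw : String)
    (rest : List String) (idx : Int) (hd : (delimiter == ",") = false) :
    loopA delimiter skip (raw :: rest) idx =
      (if is_candidate (PySem.Str.strip raw) skip then
        (let columns := (pySplit (PySem.Str.strip raw) "\t").map (fun p => PySem.Str.strip p)
         let scan := innerScanA skip rest false
         if scan.2 || !scan.1 then (some idx, columns) else loopA delimiter skip rest (idx + 1))
      else loopA delimiter skip rest (idx + 1)) := by
  simp only [loopA, hd, Bool.false_eq_true, if_false]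
  by_cases h0 : (PySem.Str.strip raw == "") = true
  · simp only [h0, if_true, cand_false_of_empty _ skip h0, Bool.false_eq_true, if_false]
  · rw [Bool.not_eq_true] at h0
    simp only [h0, Bool.false_eq_true, if_false]
    by_cases h1 : (PySem.Str.startswith (PySem.Str.strip raw) "#" ||
        PySem.Str.startswith (PySem.Str.strip raw) "*") = true
    · simp only [h1, if_true, cand_false_of_comment _ skip h1, Bool.false_eq_true, if_false]
    · rw [Bool.not_eq_true] at h1
      simp only [h1, Bool.false_eq_true, if_false]
      by_cases h2 : PySem.Str.isIn "\t" (PySem.Str.strip raw) = true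
      · simp only [h2, Bool.not_true, Bool.false_eq_true, if_false]
        by_cases h3 : (((pySplit (PySem.Str.strip raw) "\t").map (fun p => PySem.Str.strip p)).filter
            (fun p => p ≠ "")).length < 2
        · simp only [if_pos h3, cand_false_of_few _ skip h3, Bool.false_eq_true, if_false]
        · simp only [if_neg h3]
          by_cases h4 : (skip && looks_like_kv ((pySplit (PySem.Str.strip raw) "\t").map
              (fun p => PySem.Str.strip p))) = true
          · rcases Bool.and_eq_true_iff.mp h4 with ⟨hs, hkv⟩
            simp only [h4, if_true, cand_false_of_kv _ skip hs hkv, Bool.false_eq_true, if_false]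
          · rw [Bool.not_eq_true] at h4
            have hkv : skip = true → looks_like_kv ((pySplit (PySem.Str.strip raw) "\t").map
                (fun p => PySem.Str.strip p)) = false := by
              intro hs
              rcases Bool.and_eq_false_iff.mp h4 with h | h
              · rw [hs] at h; exact absurd h (by simp)
              · exact h
            simp only [h4, Bool.false_eq_true, if_false, cand_true _ skip h0 h1 h2 h3 hkv, if_true]
      · rw [Bool.not_eq_true] at h2
        simp only [h2, Bool.not_false, if_true, cand_false_of_notab _ skip h2,
          Bool.false_eq_true, if_false]

-- A's inner scan computes (seen a non-empty line, seen a candidate line)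
theorem innerScanA_eq (skip : Bool) (rest : List String) (b : Bool) :
    innerScanA skip rest b =
      (b || rest.any (fun l => !(PySem.Str.strip l == "")),
       rest.any (fun l => is_candidate (PySem.Str.strip l) skip)) := by
  induction rest generalizing b with
  | nil => simp [innerScanA]
  | cons f rest ih =>
    simp only [innerScanA, List.any_cons]
    by_cases h0 : (PySem.Str.strip f == "") = true
    · simp only [h0, if_true, ih, cand_false_of_empty _ skip h0, Bool.not_true, Bool.false_or]
    · rw [Bool.not_eq_true] at h0
      simp only [h0, Bool.false_eq_true, if_false, Bool.not_false, Bool.true_or, Bool.or_true]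
      by_cases h1 : (PySem.Str.startswith (PySem.Str.strip f) "#" ||
          PySem.Str.startswith (PySem.Str.strip f) "*") = true
      · simp only [h1, if_true, ih, cand_false_of_comment _ skip h1, Bool.true_or, Bool.false_or]
      · rw [Bool.not_eq_true] at h1
        simp only [h1, Bool.false_eq_true, if_false]
        by_cases h2 : PySem.Str.isIn "\t" (PySem.Str.strip f) = true
        · simp only [h2, Bool.not_true, Bool.false_eq_true, if_false]
          by_cases h3 : (((pySplit (PySem.Str.strip f) "\t").map (fun p => PySem.Str.strip p)).filter
              (fun p => p ≠ "")).length < 2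
          · simp only [if_pos h3, ih, cand_false_of_few _ skip h3, Bool.true_or, Bool.false_or]
          · simp only [if_neg h3]
            by_cases h4 : (skip && looks_like_kv ((pySplit (PySem.Str.strip f) "\t").map
                (fun p => PySem.Str.strip p))) = true
            · rcases Bool.and_eq_true_iff.mp h4 with ⟨hs, hkv⟩
              simp only [h4, if_true, ih, cand_false_of_kv _ skip hs hkv, Bool.true_or, Bool.false_or]
            · rw [Bool.not_eq_true] at h4
              have hkv : skip = true → looks_like_kv ((pySplit (PySem.Str.strip f) "\t").map
                  (fun p => PySem.Str.strip p)) = false := by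
                intro hs
                rcases Bool.and_eq_false_iff.mp h4 with h | h
                · rw [hs] at h; exact absurd h (by simp)
                · exact h
              simp only [h4, Bool.false_eq_true, if_false,
                cand_true _ skip h0 h1 h2 h3 hkv, Bool.true_or]
        · rw [Bool.not_eq_true] at h2
          simp only [h2, Bool.not_false, if_true, ih, cand_false_of_notab _ skip h2,
            Bool.true_or, Bool.false_or]

-- a candidate-free suffix yields (None, [])
theorem loopA_no_cand (delimiter : String) (skip : Bool) (lines : List String) (idx : Int)
    (hd : (delimiter == ",") = false)
    (h : lines.any (fun l => is_candidate (PySem.Str.strip l) skip) = false) :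
    loopA delimiter skip lines idx = (none, []) := by
  induction lines generalizing idx with
  | nil => rfl
  | cons raw rest ih =>
    simp only [List.any_cons, Bool.or_eq_false_iff] at h
    rw [loopA_cons_eq delimiter skip raw rest idx hd]
    simp only [h.1, Bool.false_eq_true, if_false]
    exact ih (idx + 1) h.2

-- the main loop correspondence (non-CSV)
theorem loopA_eq_B (delimiter : String) (skip : Bool) (lines : List String) (idx : Int)
    (hd : (delimiter == ",") = false) :
    loopA delimiter skip lines idx =
      (match findFirstCandB skip lines idx with
       | none => (none, [])
       | some (i, raw, rest) =>
         let columns := (pySplit (PySem.Str.strip raw) "\t").map (fun p => PySem.Str.strip p)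
         if rest.any (fun l => is_candidate (PySem.Str.strip l) skip) then (some i, columns)
         else if rest.any (fun l => !(PySem.Str.strip l == "")) then (none, [])
         else (some i, columns)) := by
  induction lines generalizing idx with
  | nil => rfl
  | cons raw rest ih =>
    rw [loopA_cons_eq delimiter skip raw rest idx hd]
    simp only [findFirstCandB]
    by_cases hc : is_candidate (PySem.Str.strip raw) skip = true
    · simp only [hc, if_true, innerScanA_eq, Bool.false_or]
      by_cases hca : rest.any (fun l => is_candidate (PySem.Str.strip l) skip) = true
      · simp only [hca, Bool.true_or, if_true]
      · rw [Bool.not_eq_true] at hca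
        simp only [hca, Bool.false_eq_true, if_false, Bool.false_or]
        by_cases hne : rest.any (fun l => !(PySem.Str.strip l == "")) = true
        · simp only [hne, Bool.not_true, Bool.false_eq_true, if_false, if_true]
          exact loopA_no_cand delimiter skip rest (idx + 1) hd hca
        · rw [Bool.not_eq_true] at hne
          simp only [hne, Bool.not_false, if_true, Bool.false_eq_true, if_false]
    · rw [Bool.not_eq_true] at hc
      simp only [hc, Bool.false_eq_true, if_false]
      exact ih (idx + 1)

-- ===== VERDICT (by name: the statement is the Claim_ definition above) =====
theorem find_tabular_header_py_spec : Claim_equal_find_tabular_header_py := by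
  intro lines delimiter preamble_style _
  unfold Spec_find_tabular_header_py find_tabular_header_py find_tabular_header_py_alt
  by_cases hd : (delimiter == ",") = true
  · rw [beq_iff_eq] at hd
    subst hd
    simp [loopA_csv]
  · rw [Bool.not_eq_true] at hd
    simp only [hd, Bool.false_eq_true, if_false]
    rw [loopA_eq_B delimiter (preamble_style == "key_value") lines 0 hd]
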